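-- pv_equiv track=rewrite | github.com/reginaib/Programming | first_evaluation_practise/2/vice_compession.py | censor
-- ===== SOURCE A (Python) =====
-- def censored(word):
--     return f'{word[0]}{len(word)}'
--
-- def censor(sentence):
--     encoded_text = ''
--     word = ''
--
--     for char in sentence:
--         if char.isalpha():
--             word += char
--         else:
--             if word:
--                 encoded_text += censored(word)
--                 word = ''
--             encoded_text += char
--     if word:
--         encoded_text += censored(word)
--
--     return encoded_text
-- ===== SOURCE B (Python) =====
-- def censor(sentence):
--     parts = []
--     i = 0
--     n = len(sentence)
--     while i < n:
--         k = sentence[i].isalpha()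
--         j = i + 1
--         while j < n and sentence[j].isalpha() == k:
--             j += 1
--         run = sentence[i:j]
--         parts.append(f'{run[0]}{len(run)}' if k else run)
--         i = j
--     return ''.join(parts)
-- ===== Notes on version B (the rewrite author's own statement) =====
-- stated objective: alternative
-- what changed: Replaces A's char-by-char accumulator state machine (pending-word buffer flushed on each non-letter) with an index-based scanner over maximal alpha/non-alpha runs, encoding each whole run at once.
import Mathlib
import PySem

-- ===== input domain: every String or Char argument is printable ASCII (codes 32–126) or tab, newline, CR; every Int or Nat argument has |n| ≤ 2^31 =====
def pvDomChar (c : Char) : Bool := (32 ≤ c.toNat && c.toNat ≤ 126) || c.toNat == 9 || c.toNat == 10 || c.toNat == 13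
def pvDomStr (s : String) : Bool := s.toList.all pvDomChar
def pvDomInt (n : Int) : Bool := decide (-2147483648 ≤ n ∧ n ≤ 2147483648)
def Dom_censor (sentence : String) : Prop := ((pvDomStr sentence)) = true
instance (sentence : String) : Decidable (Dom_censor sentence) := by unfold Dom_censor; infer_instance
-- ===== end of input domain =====

-- B replaces A's char-by-char word-accumulator state machine by an index-free run
-- scanner (maximal alpha/non-alpha runs, each encoded at once); objective: alternative.

-- ===== PORT A =====
-- f'{word[0]}{len(word)}' (only called on nonempty word in A)
def censoredA (w : List Char) : List Char :=
  ((PySem.List.pyGet? w 0).map (fun c => [c])).getD [] ++ (PySem.Int.toStr (w.length : Int)).toList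

-- the loop body of A's for-loop
def stepA (s : List Char × List Char) (c : Char) : List Char × List Char :=
  if PySem.Chars.isalpha c then (s.1, s.2 ++ [c])
  else ((s.1 ++ (if s.2 ≠ [] then censoredA s.2 else [])) ++ [c], ([] : List Char))

def censor (sentence : String) : String :=
  String.ofList ((sentence.toList.foldl stepA ([], [])).1 ++
    (if (sentence.toList.foldl stepA ([], [])).2 ≠ []
     then censoredA (sentence.toList.foldl stepA ([], [])).2 else []))

-- ===== PORT B =====
-- one piece per maximal run: the inner `while j < n and sentence[j].isalpha() == k`
-- is the takeWhile/dropWhile split, the run is sentence[i:j]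
def runPieces : List Char → List (List Char)
  | [] => []
  | c :: rest =>
    let k := PySem.Chars.isalpha c
    let run := c :: rest.takeWhile (fun x => PySem.Chars.isalpha x == k)
    (if k then ((PySem.List.pyGet? run 0).map (fun c => [c])).getD [] ++ (PySem.Int.toStr (run.length : Int)).toList
     else run)
      :: runPieces (rest.dropWhile (fun x => PySem.Chars.isalpha x == k))
termination_by l => l.length
decreasing_by
  simpa using Nat.lt_succ_of_le (List.length_dropWhile_le _ _)

def censor_alt (sentence : String) : String :=
  String.ofList (runPieces sentence.toList).flatten

-- ===== PRECONDITION & SPEC =====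
def Spec_censor (sentence : String) (out : String) : Prop := out = censor_alt sentence
instance (sentence : String) (out : String) : Decidable (Spec_censor sentence out) := by unfold Spec_censor; infer_instance

-- ===== CLAIM (what is proved, stated in full; the proofs are below) =====
def Claim_equal_censor : Prop := ∀ (sentence : String), Dom_censor sentence → Spec_censor sentence (censor sentence)

-- ===== LEMMAS AND PROOFS =====

-- flush of the pending word, as A does it
def flushW (w : List Char) : List Char := if w ≠ [] then censoredA w else []

-- the rest of A's output given a pending all-alpha word and the remaining input
def outSpec : List Char → List Char → List Char
  | word, [] => flushW word
  | word, c :: cs =>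
      if PySem.Chars.isalpha c then outSpec (word ++ [c]) cs
      else flushW word ++ [c] ++ outSpec [] cs

lemma foldA (cs : List Char) : ∀ (enc word : List Char),
    (cs.foldl stepA (enc, word)).1 ++ flushW (cs.foldl stepA (enc, word)).2
      = enc ++ outSpec word cs := by
  induction cs with
  | nil => intro enc word; simp [outSpec, flushW]
  | cons c cs ih =>
    intro enc word
    by_cases h : PySem.Chars.isalpha c = true
    · simp only [List.foldl_cons, stepA, if_pos h]
      rw [ih]; simp [outSpec, h]
    · simp only [List.foldl_cons, stepA, if_neg h]
      rw [ih]; simp [outSpec, h, flushW]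

lemma out_alpha (cs : List Char) : ∀ (word : List Char), word ≠ [] →
    outSpec word cs
      = censoredA (word ++ cs.takeWhile (fun x => PySem.Chars.isalpha x))
        ++ outSpec [] (cs.dropWhile (fun x => PySem.Chars.isalpha x)) := by
  induction cs with
  | nil => intro word hw; simp [outSpec, flushW, hw]
  | cons c cs ih =>
    intro word hw
    by_cases h : PySem.Chars.isalpha c = true
    · simp only [outSpec, h, if_pos, List.takeWhile_cons, List.dropWhile_cons]
      rw [ih (word ++ [c]) (by simp)]
      simp
    · simp [outSpec, h, flushW, hw, List.dropWhile_cons]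

lemma out_nonalpha (cs : List Char) :
    outSpec [] cs
      = cs.takeWhile (fun x => !PySem.Chars.isalpha x)
        ++ outSpec [] (cs.dropWhile (fun x => !PySem.Chars.isalpha x)) := by
  induction cs with
  | nil => simp [outSpec, flushW]
  | cons c cs ih =>
    by_cases h : PySem.Chars.isalpha c = true
    · simp [h]
    · simp only [outSpec, h, if_neg, Bool.false_eq_true, not_false_iff,
        List.takeWhile_cons, List.dropWhile_cons]
      simp [flushW, ih]

lemma alt_eq_out : ∀ (n : Nat) (cs : List Char), cs.length ≤ n →
    (runPieces cs).flatten = outSpec [] cs := by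
  intro n
  induction n with
  | zero => intro cs h; simp at h; simp [h, runPieces, outSpec, flushW]
  | succ n ih =>
    intro cs h
    match cs with
    | [] => simp [runPieces, outSpec, flushW]
    | c :: rest =>
      rw [runPieces]
      by_cases hc : PySem.Chars.isalpha c = true
      · have hdrop : (rest.dropWhile (fun x => PySem.Chars.isalpha x == true)).length ≤ n := by
          have := List.length_dropWhile_le (fun x => PySem.Chars.isalpha x == true) rest
          simp at h; omega
        have h1 : outSpec [] (c :: rest) = outSpec [c] rest := by
          simp [outSpec, hc]
        rw [h1, out_alpha rest [c] (by simp)]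
        simp only [hc, if_pos, List.flatten_cons]
        rw [ih _ (by simpa using hdrop)]
        simp [censoredA, PySem.List.pyGet?]
      · have hc' : PySem.Chars.isalpha c = false := by simp at hc; exact hc
        have hdrop : (rest.dropWhile (fun x => PySem.Chars.isalpha x == false)).length ≤ n := by
          have := List.length_dropWhile_le (fun x => PySem.Chars.isalpha x == false) rest
          simp at h; omega
        have h1 : outSpec [] (c :: rest) = [c] ++ outSpec [] rest := by
          simp [outSpec, hc', flushW]
        rw [h1, out_nonalpha rest]
        simp only [hc', if_neg, Bool.false_eq_true, not_false_iff, List.flatten_cons]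
        rw [ih _ (by simpa using hdrop)]
        simp

-- ===== VERDICT (by name: the statement is the Claim_ definition above) =====
theorem censor_spec : Claim_equal_censor := by
  intro sentence _
  have h := foldA sentence.toList [] []
  simp only [flushW, List.nil_append] at h
  unfold Spec_censor censor censor_alt
  rw [alt_eq_out sentence.toList.length sentence.toList le_rfl, h]
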